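-- pv_equiv track=rewrite | github.com/Air2air/z-beam-generator | core/services/prompt_optimizer.py | _extract_common_phrases
-- ===== SOURCE A (Python) =====
-- from typing import Dict, List, Tuple, Optional
--
-- def _extract_common_phrases(prompts: List[str]) -> List[str]:
--     """Extract common phrases and patterns from successful prompts."""
--     # Simple pattern extraction - could be enhanced with NLP
--     common_terms = [
--         "formal language",
--         "generic phrasing",
--         "perfect grammar",
--         "forced casual language",
--         "fake emotions",
--         "performative authenticity",
--         "structured content",
--         "consistent tone",
--         "technical precision",
--     ]
--
--     # Return terms that appear in multiple prompts
--     relevant_terms = []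
--     for term in common_terms:
--         if sum(1 for prompt in prompts if term.lower() in prompt.lower()) >= 2:
--             relevant_terms.append(term)
--
--     return relevant_terms or common_terms[:3]
-- ===== SOURCE B (Python) =====
-- def _extract_common_phrases(prompts):
--     """Extract common phrases and patterns from successful prompts."""
--     common_terms = [
--         "formal language",
--         "generic phrasing",
--         "perfect grammar",
--         "forced casual language",
--         "fake emotions",
--         "performative authenticity",
--         "structured content",
--         "consistent tone",
--         "technical precision",
--     ]
--
--     # Two-set duplicate detection instead of counting: walk the prompts once;
--     # the first prompt containing a term puts it in `seen`, any later prompt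
--     # containing it promotes it to `dup`.  A term is "relevant" exactly when it
--     # was promoted, i.e. occurs in at least two prompts — no counts are kept.
--     seen = set()
--     dup = set()
--     for prompt in prompts:
--         low = prompt.lower()
--         for term in common_terms:
--             if term in low:
--                 if term in seen:
--                     dup.add(term)
--                 else:
--                     seen.add(term)
--
--     relevant_terms = [t for t in common_terms if t in dup]
--     return relevant_terms or common_terms[:3]
-- ===== Notes on version B (the rewrite author's own statement) =====
-- stated objective: faster
-- what changed: B replaces A's per-term counting scans by two-set duplicate detection: a single walk over the prompts (each lowercased once) where a term's first hit is recorded in a `seen` set and any later hit promotes it to a `dup` set; the relevant terms are exactly the promoted ones, so no counts are ever kept.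
import Mathlib
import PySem

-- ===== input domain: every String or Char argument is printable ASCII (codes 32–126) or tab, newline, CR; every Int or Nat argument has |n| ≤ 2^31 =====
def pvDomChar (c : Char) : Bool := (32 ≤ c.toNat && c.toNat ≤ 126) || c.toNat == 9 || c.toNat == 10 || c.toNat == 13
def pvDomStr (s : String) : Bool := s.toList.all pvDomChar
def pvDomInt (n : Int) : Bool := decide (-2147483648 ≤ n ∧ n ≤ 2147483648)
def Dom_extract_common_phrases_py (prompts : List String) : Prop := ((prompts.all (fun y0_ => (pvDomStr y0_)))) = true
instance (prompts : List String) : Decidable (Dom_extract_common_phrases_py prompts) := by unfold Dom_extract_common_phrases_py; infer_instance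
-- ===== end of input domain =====

-- B replaces A's per-term counting scans by two-set duplicate detection: one walk over
-- the prompts, each lowercased once, where a term's first hit goes into `seen` and a
-- later hit promotes it to `dup`; the relevant terms are exactly the promoted ones —
-- no counts are kept; measured faster in a timing run (constant factor); same results.


-- the fixed term list shared (as source text) by both Pythons
def pvCommonTerms : List String :=
  ["formal language", "generic phrasing", "perfect grammar", "forced casual language",
   "fake emotions", "performative authenticity", "structured content", "consistent tone",
   "technical precision"]

-- ===== PORT A =====
def extract_common_phrases_py (prompts : List String) : List String :=
  let common_terms := pvCommonTerms
  let relevant_terms :=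
    common_terms.foldl
      (fun acc term =>
        if (prompts.map (fun prompt =>
              if PySem.Str.isIn (PySem.Str.lower term) (PySem.Str.lower prompt) then (1 : Int) else 0)).sum ≥ 2
        then acc ++ [term] else acc)
      []
  if relevant_terms = [] then PySem.List.slice common_terms none (some 3) else relevant_terms

-- ===== PORT B =====
-- body of B's inner `for term in common_terms:` loop at one lowercased prompt
def pvStep (low : String) (st : PySem.Set String × PySem.Set String) (term : String) :
    PySem.Set String × PySem.Set String :=
  if PySem.Str.isIn term low then
    if PySem.Set.contains st.1 term then (st.1, PySem.Set.add st.2 term)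
    else (PySem.Set.add st.1 term, st.2)
  else st

def extract_common_phrases_py_alt (prompts : List String) : List String :=
  let common_terms := pvCommonTerms
  let st :=
    prompts.foldl
      (fun st prompt =>
        let low := PySem.Str.lower prompt
        common_terms.foldl (pvStep low) st)
      ((PySem.Set.empty : PySem.Set String), (PySem.Set.empty : PySem.Set String))
  let relevant_terms := common_terms.filter (fun t => PySem.Set.contains st.2 t)
  if relevant_terms = [] then PySem.List.slice common_terms none (some 3) else relevant_terms

-- ===== PRECONDITION & SPEC =====
def Spec_extract_common_phrases_py (prompts : List String) (out : List String) : Prop := out = extract_common_phrases_py_alt prompts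
instance (prompts : List String) (out : List String) : Decidable (Spec_extract_common_phrases_py prompts out) := by unfold Spec_extract_common_phrases_py; infer_instance

-- ===== CLAIM (what is proved, stated in full; the proofs are below) =====
def Claim_equal_extract_common_phrases_py : Prop := ∀ (prompts : List String), Dom_extract_common_phrases_py prompts → Spec_extract_common_phrases_py prompts (extract_common_phrases_py prompts)

-- ===== LEMMAS AND PROOFS =====

-- inner loop at one prompt: membership in (seen, dup) after scanning a duplicate-free term list
theorem pv_inner_mem (low t : String) :
    ∀ (terms : List String), terms.Nodup → ∀ (st : PySem.Set String × PySem.Set String),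
    (t ∈ (terms.foldl (pvStep low) st).1 ↔ t ∈ st.1 ∨ (t ∈ terms ∧ PySem.Str.isIn t low = true)) ∧
    (t ∈ (terms.foldl (pvStep low) st).2 ↔ t ∈ st.2 ∨ (t ∈ terms ∧ PySem.Str.isIn t low = true ∧ t ∈ st.1)) := by
  intro terms
  induction terms with
  | nil => intro _ st; simp
  | cons term rest ih =>
    intro hnd st
    have hterm : term ∉ rest := (List.nodup_cons.mp hnd).1
    have hrest := (List.nodup_cons.mp hnd).2
    simp only [List.foldl_cons]
    by_cases hin : PySem.Str.isIn term low = true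
    · by_cases hc : term ∈ st.1
      · have hstep : pvStep low st term = (st.1, PySem.Set.add st.2 term) := by
          unfold pvStep
          rw [if_pos hin, if_pos ((PySem.Set.contains_iff st.1 term).mpr hc)]
        rw [hstep]
        obtain ⟨ih1, ih2⟩ := ih hrest (st.1, PySem.Set.add st.2 term)
        rw [ih1, ih2]
        simp only [PySem.Set.mem_add, List.mem_cons]
        constructor
        · constructor
          · rintro (h | ⟨h, hi⟩)
            · exact Or.inl h
            · exact Or.inr ⟨Or.inr h, hi⟩
          · rintro (h | ⟨h | h, hi⟩)
            · exact Or.inl h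
            · subst h; exact Or.inl hc
            · exact Or.inr ⟨h, hi⟩
        · constructor
          · rintro ((h | h) | ⟨h, hi, hs⟩)
            · exact Or.inl h
            · subst h; exact Or.inr ⟨Or.inl rfl, hin, hc⟩
            · exact Or.inr ⟨Or.inr h, hi, hs⟩
          · rintro (h | ⟨h | h, hi, hs⟩)
            · exact Or.inl (Or.inl h)
            · subst h; exact Or.inl (Or.inr rfl)
            · exact Or.inr ⟨h, hi, hs⟩
      · have hcf : PySem.Set.contains st.1 term = false := by
          cases h : PySem.Set.contains st.1 term
          · rfl
          · exact absurd ((PySem.Set.contains_iff st.1 term).mp h) hc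
        have hstep : pvStep low st term = (PySem.Set.add st.1 term, st.2) := by
          unfold pvStep
          rw [if_pos hin, if_neg (by simp [hc])]
        rw [hstep]
        obtain ⟨ih1, ih2⟩ := ih hrest (PySem.Set.add st.1 term, st.2)
        rw [ih1, ih2]
        simp only [PySem.Set.mem_add, List.mem_cons]
        constructor
        · constructor
          · rintro ((h | h) | ⟨h, hi⟩)
            · exact Or.inl h
            · subst h; exact Or.inr ⟨Or.inl rfl, hin⟩
            · exact Or.inr ⟨Or.inr h, hi⟩
          · rintro (h | ⟨h | h, hi⟩)
            · exact Or.inl (Or.inl h)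
            · subst h; exact Or.inl (Or.inr rfl)
            · exact Or.inr ⟨h, hi⟩
        · constructor
          · rintro (h | ⟨h, hi, hs | hs⟩)
            · exact Or.inl h
            · exact Or.inr ⟨Or.inr h, hi, hs⟩
            · subst hs; exact absurd h hterm
          · rintro (h | ⟨h | h, hi, hs⟩)
            · exact Or.inl h
            · subst h; exact absurd hs hc
            · exact Or.inr ⟨h, hi, Or.inl hs⟩
    · have hstep : pvStep low st term = st := by
        unfold pvStep
        rw [if_neg hin]
      rw [hstep]
      obtain ⟨ih1, ih2⟩ := ih hrest st
      rw [ih1, ih2]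
      simp only [List.mem_cons]
      constructor
      · constructor
        · rintro (h | ⟨h, hi⟩)
          · exact Or.inl h
          · exact Or.inr ⟨Or.inr h, hi⟩
        · rintro (h | ⟨h | h, hi⟩)
          · exact Or.inl h
          · subst h; exact absurd hi hin
          · exact Or.inr ⟨h, hi⟩
      · constructor
        · rintro (h | ⟨h, hi, hs⟩)
          · exact Or.inl h
          · exact Or.inr ⟨Or.inr h, hi, hs⟩
        · rintro (h | ⟨h | h, hi, hs⟩)
          · exact Or.inl h
          · subst h; exact absurd hi hin
          · exact Or.inr ⟨h, hi, hs⟩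

-- outer loop: membership in (seen, dup) in terms of how many prompts contain t
theorem pv_outer_mem (t : String) (ht : t ∈ pvCommonTerms) :
    ∀ (prompts : List String) (st : PySem.Set String × PySem.Set String),
    (t ∈ (prompts.foldl (fun st prompt => pvCommonTerms.foldl (pvStep (PySem.Str.lower prompt)) st) st).1 ↔
        t ∈ st.1 ∨ 1 ≤ prompts.countP (fun p => PySem.Str.isIn t (PySem.Str.lower p))) ∧
    (t ∈ (prompts.foldl (fun st prompt => pvCommonTerms.foldl (pvStep (PySem.Str.lower prompt)) st) st).2 ↔
        t ∈ st.2 ∨ (t ∈ st.1 ∧ 1 ≤ prompts.countP (fun p => PySem.Str.isIn t (PySem.Str.lower p)))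
          ∨ 2 ≤ prompts.countP (fun p => PySem.Str.isIn t (PySem.Str.lower p))) := by
  have hnd : pvCommonTerms.Nodup := by decide
  intro prompts
  induction prompts with
  | nil => intro st; simp
  | cons p rest ih =>
    intro st
    simp only [List.foldl_cons]
    obtain ⟨in1, in2⟩ := pv_inner_mem (PySem.Str.lower p) t pvCommonTerms hnd st
    obtain ⟨ih1, ih2⟩ := ih (pvCommonTerms.foldl (pvStep (PySem.Str.lower p)) st)
    rw [ih1, ih2, in1, in2]
    cases hin : PySem.Str.isIn t (PySem.Str.lower p) with
    | true =>
      have hcnt : List.countP (fun q => PySem.Str.isIn t (PySem.Str.lower q)) (p :: rest)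
          = List.countP (fun q => PySem.Str.isIn t (PySem.Str.lower q)) rest + 1 := by
        rw [List.countP_cons]; simp only [hin, if_pos]
      rw [hcnt]
      constructor
      · constructor
        · rintro ((h | ⟨_, _⟩) | hc)
          · exact Or.inl h
          · exact Or.inr (by omega)
          · exact Or.inr (by omega)
        · intro _
          exact Or.inl (Or.inr ⟨ht, rfl⟩)
      · constructor
        · rintro ((h | ⟨_, _, hs⟩) | (⟨h | ⟨_, _⟩, hc⟩ | hc))
          · exact Or.inl h
          · exact Or.inr (Or.inl ⟨hs, by omega⟩)
          · exact Or.inr (Or.inl ⟨h, by omega⟩)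
          · exact Or.inr (Or.inr (by omega))
          · exact Or.inr (Or.inr (by omega))
        · rintro (h | ⟨h, _⟩ | hc)
          · exact Or.inl (Or.inl h)
          · exact Or.inl (Or.inr ⟨ht, rfl, h⟩)
          · exact Or.inr (Or.inl ⟨Or.inr ⟨ht, rfl⟩, by omega⟩)
    | false =>
      have hcnt : List.countP (fun q => PySem.Str.isIn t (PySem.Str.lower q)) (p :: rest)
          = List.countP (fun q => PySem.Str.isIn t (PySem.Str.lower q)) rest := by
        rw [List.countP_cons]
        simp [show PySem.Chars.isIn t.toList (PySem.Chars.lower p.toList) = false by simpa using hin]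
      rw [hcnt]
      constructor
      · constructor
        · rintro ((h | ⟨_, hx⟩) | hc)
          · exact Or.inl h
          · exact (Bool.false_ne_true hx).elim
          · exact Or.inr hc
        · rintro (h | hc)
          · exact Or.inl (Or.inl h)
          · exact Or.inr hc
      · constructor
        · rintro ((h | ⟨_, hx, _⟩) | (⟨h | ⟨_, hx⟩, hc⟩ | hc))
          · exact Or.inl h
          · exact (Bool.false_ne_true hx).elim
          · exact Or.inr (Or.inl ⟨h, hc⟩)
          · exact (Bool.false_ne_true hx).elim
          · exact Or.inr (Or.inr hc)
        · rintro (h | ⟨h, hc⟩ | hc)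
          · exact Or.inl (Or.inl h)
          · exact Or.inr (Or.inl ⟨Or.inl h, hc⟩)
          · exact Or.inr (Or.inr hc)

-- each of the 9 fixed terms is already lowercase
theorem pv_lower_term (t : String) (ht : t ∈ pvCommonTerms) : PySem.Str.lower t = t := by
  fin_cases ht <;> decide

-- ===== VERDICT (by name: the statement is the Claim_ definition above) =====
theorem extract_common_phrases_py_spec : Claim_equal_extract_common_phrases_py := by
  intro prompts _
  unfold Spec_extract_common_phrases_py extract_common_phrases_py extract_common_phrases_py_alt
  simp only
  rw [PySem.List.foldl_append_ite_eq_filter, List.nil_append]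
  have hfilter :
      (pvCommonTerms.filter (fun term =>
        decide ((prompts.map (fun prompt =>
          if PySem.Str.isIn (PySem.Str.lower term) (PySem.Str.lower prompt) then (1 : Int) else 0)).sum ≥ 2)))
      = pvCommonTerms.filter (fun t =>
          PySem.Set.contains
            (prompts.foldl (fun st prompt => pvCommonTerms.foldl (pvStep (PySem.Str.lower prompt)) st)
              ((PySem.Set.empty : PySem.Set String), (PySem.Set.empty : PySem.Set String))).2 t) := by
    apply List.filter_congr
    intro t ht
    have h2 := (pv_outer_mem t ht prompts ((PySem.Set.empty : PySem.Set String), (PySem.Set.empty : PySem.Set String))).2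
    simp only [PySem.Set.empty, List.not_mem_nil, false_or, false_and] at h2
    rw [pv_lower_term t ht, PySem.List.sum_map_ite_one_zero]
    rw [Bool.eq_iff_iff, decide_eq_true_eq, PySem.Set.contains_iff]
    simp only [PySem.Set.empty]
    rw [h2]
    omega
  rw [hfilter]
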